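-- pv_equiv track=rewrite | github.com/rocketeerli/Computer-VisionandAudio-Lab | lab2/lab2.py | calCompressedData
-- ===== SOURCE A (Python) =====
-- def calCompressedData(diff_value, quantized_num) :
--     if diff_value > 7 * quantized_num :
--         return 7
--     elif diff_value < -8 * quantized_num :
--         return -8
--     for i in range(16) :
--         j = i - 8
--         if (j - 1) * quantized_num < diff_value and diff_value <= j * quantized_num :
--             return j
-- ===== SOURCE B (Python) =====
-- def calCompressedData(diff_value, quantized_num):
--     # bucket index = ceil(diff_value / quantized_num), clamped into [-8, 7]
--     j = -((-diff_value) // quantized_num)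
--     return max(-8, min(7, j))
-- ===== Notes on version B (the rewrite author's own statement) =====
-- stated objective: simpler
-- what changed: Replaces the 16-iteration bucket scan with a single clamped ceiling division; Pre_ restricts to a positive quantization step quantized_num > 0, since for quantized_num <= 0 A's clamp-only values (and the implicit None at (0,0)) are loop-fall-through artefacts and B's division raises or buckets differently there.
-- outside the precondition, e.g. on calCompressedData(5, -1): A returns 7, B returns -5; on calCompressedData(3, 0): A returns 7, B raises ZeroDivisionError; on calCompressedData(0, 0): A returns None, B raises ZeroDivisionError
import Mathlib
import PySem

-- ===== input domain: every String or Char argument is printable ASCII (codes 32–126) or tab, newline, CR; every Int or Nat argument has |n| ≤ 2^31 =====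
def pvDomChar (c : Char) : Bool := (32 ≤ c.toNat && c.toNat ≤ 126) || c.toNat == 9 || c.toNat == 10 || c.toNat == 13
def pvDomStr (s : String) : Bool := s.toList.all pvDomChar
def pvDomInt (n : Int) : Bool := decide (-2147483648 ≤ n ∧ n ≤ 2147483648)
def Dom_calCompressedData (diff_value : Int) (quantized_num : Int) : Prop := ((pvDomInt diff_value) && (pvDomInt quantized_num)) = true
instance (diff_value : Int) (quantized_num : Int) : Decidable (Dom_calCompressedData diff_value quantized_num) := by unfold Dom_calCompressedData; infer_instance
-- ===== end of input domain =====

-- B replaces A's 16-iteration bucket scan with one clamped ceiling division; simpler constant-time arithmetic, claimed for a positive quantization step (Pre_).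

-- ===== PORT A =====
-- the for-loop over range(16) with early return, as structural recursion over the range list
def calCompressedDataLoop (diff_value : Int) (quantized_num : Int) : List Int → Option Int
  | [] => none
  | i :: rest =>
    if (i - 8 - 1) * quantized_num < diff_value ∧ diff_value ≤ (i - 8) * quantized_num then some (i - 8)
    else calCompressedDataLoop diff_value quantized_num rest

def calCompressedData (diff_value : Int) (quantized_num : Int) : Option Int :=
  if diff_value > 7 * quantized_num then some 7
  else if diff_value < -8 * quantized_num then some (-8)
  else calCompressedDataLoop diff_value quantized_num (PySem.List.pyRange 0 16 1)

-- ===== PORT B =====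
def calCompressedData_alt (diff_value : Int) (quantized_num : Int) : Option Int :=
  -- bucket index = ceil(diff_value / quantized_num), clamped into [-8, 7]
  some (max (-8) (min 7 (-(PySem.Int.floordiv (-diff_value) quantized_num))))

-- ===== PRECONDITION & SPEC =====
-- Pre_ restricts to a positive quantization step: for quantized_num ≤ 0 A's clamp-only values
-- (and the implicit None at (0,0)) are loop-fall-through artefacts outside the task's natural
-- domain, and B's division raises (quantized_num = 0) or buckets differently (quantized_num < 0).
def Pre_calCompressedData (diff_value : Int) (quantized_num : Int) : Prop := 0 < quantized_num
instance (diff_value : Int) (quantized_num : Int) : Decidable (Pre_calCompressedData diff_value quantized_num) := by unfold Pre_calCompressedData; infer_instance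
def pvWitness_calCompressedData : Int × Int := (3, 2)
def Spec_calCompressedData (diff_value : Int) (quantized_num : Int) (out : Option Int) : Prop := out = calCompressedData_alt diff_value quantized_num
instance (diff_value : Int) (quantized_num : Int) (out : Option Int) : Decidable (Spec_calCompressedData diff_value quantized_num out) := by unfold Spec_calCompressedData; infer_instance

-- ===== CLAIM (what is proved, stated in full; the proofs are below) =====
def Claim_equal_calCompressedData : Prop := ∀ (diff_value : Int) (quantized_num : Int), Dom_calCompressedData diff_value quantized_num → Pre_calCompressedData diff_value quantized_num → Spec_calCompressedData diff_value quantized_num (calCompressedData diff_value quantized_num)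

-- ===== LEMMAS AND PROOFS =====

theorem pvRange16 : PySem.List.pyRange 0 16 1 = [0,1,2,3,4,5,6,7,8,9,10,11,12,13,14,15] := by decide

theorem loop_cons (d q i : Int) (rest : List Int) :
    calCompressedDataLoop d q (i :: rest) =
      if (i - 8 - 1) * q < d ∧ d ≤ (i - 8) * q then some (i - 8)
      else calCompressedDataLoop d q rest := rfl

-- with 0 < q the bucket intervals are disjoint: the loop returns the unique k whose test holds
theorem loop_finds (d q k : Int) (hq : 0 < q) (hk1 : (k - 1) * q < d) (hk2 : d ≤ k * q) :
    ∀ l : List Int, (k + 8) ∈ l → calCompressedDataLoop d q l = some k := by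
  intro l hl
  induction l with
  | nil => cases hl
  | cons i rest ih =>
    rw [loop_cons]
    by_cases hi : i = k + 8
    · subst hi
      rw [if_pos ⟨by linarith [hk1], by linarith [hk2]⟩]
      congr 1
      omega
    · rw [if_neg]
      · exact ih ((List.mem_cons.mp hl).resolve_left (fun h => hi h.symm))
      · rintro ⟨h1, h2⟩
        have a1 : (i - 8 - 1) * q < k * q := lt_of_lt_of_le h1 hk2
        have a2 : (k - 1) * q < (i - 8) * q := lt_of_lt_of_le hk1 h2
        have b1 := lt_of_mul_lt_mul_right a1 (le_of_lt hq)
        have b2 := lt_of_mul_lt_mul_right a2 (le_of_lt hq)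
        omega

-- ===== VERDICT (by name: the statement is the Claim_ definition above) =====
theorem calCompressedData_spec : Claim_equal_calCompressedData := by
  intro d q _ hq
  unfold Spec_calCompressedData calCompressedData calCompressedData_alt
  rw [pvRange16]
  -- c is the ceiling-division bucket; it is characterised by (c-1)q < d ≤ cq
  have hk := (PySem.Int.neg_floordiv_neg_eq_iff_of_pos (a := d) (b := q)
    (q := -(PySem.Int.floordiv (-d) q)) hq).mp rfl
  set c : Int := -(PySem.Int.floordiv (-d) q) with hc
  split_ifs with h1 h2
  · -- d > 7q: c > 7, so the clamp gives 7
    have : 7 * q < c * q := lt_of_lt_of_le h1 hk.2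
    have := lt_of_mul_lt_mul_right this (le_of_lt hq)
    congr 1
    omega
  · -- d < -8q: c ≤ -8, so the clamp gives -8
    have : (c - 1) * q < -8 * q := lt_of_lt_of_le hk.1 (le_of_lt h2)
    have := lt_of_mul_lt_mul_right this (le_of_lt hq)
    congr 1
    omega
  · -- -8q ≤ d ≤ 7q: c ∈ [-8,7], the clamp is the identity and the loop finds c
    have b1 : c - 1 < 7 := lt_of_mul_lt_mul_right (lt_of_lt_of_le hk.1 (by omega : d ≤ 7 * q)) (le_of_lt hq)
    have b2 : -8 ≤ c := le_of_mul_le_mul_right (le_trans (by omega : -8 * q ≤ d) hk.2) hq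
    rw [loop_finds d q c hq hk.1 hk.2 _ (by simp only [List.mem_cons, List.not_mem_nil, or_false]; omega)]
    congr 1
    omega
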